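-- pv_equiv track=rewrite | github.com/pierrelgol/personnal-graveyard | c-projects/graveyard/archives_old_project/python/bsq.py | solve
-- ===== SOURCE A (Python) =====
-- def is_valid(matrix, row, col, size):
--     for i in range(size):
--         for j in range(size):
--             if row + i >= len(matrix) or col + j >= len(matrix[0]) or matrix[row + i][col + j] == 0:
--                 return False
--     return True
--
-- def backtrack(matrix, row, col, size):
--     if is_valid(matrix, row, col, size):
--         return size
--     return backtrack(matrix, row, col, size - 1)
--
-- def find_largest_square(matrix, rows, cols):
--     max_size = min(rows, cols)
--     for row in range(rows):
--         for col in range(cols):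
--             if matrix[row][col] == 1:
--                 max_size = max(max_size, backtrack(matrix, row, col, max_size))
--     return max_size
--
-- def update_matrix(matrix, row, col, size):
--     for i in range(size):
--         for j in range(size):
--             matrix[row + i][col + j] = 2
--
-- def solve(matrix, rows, cols):
--     largest_size = find_largest_square(matrix, rows, cols)
--     for row in range(rows):
--         for col in range(cols):
--             if matrix[row][col] == 1 and is_valid(matrix, row, col, largest_size):
--                 update_matrix(matrix, row, col, largest_size)
--                 return matrix
--
--     return None
-- ===== SOURCE B (Python) =====
-- def solve(matrix, rows, cols):
--     if rows <= 0 or cols <= 0: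
--         return None
--     n = len(matrix)
--     m = len(matrix[0]) if n > 0 else 0
--     size = min(rows, cols)
--     # dp[r][c]: side of the largest all-nonzero square with top-left corner (r, c)
--     dp = [[0] * (m + 1) for _ in range(n + 1)]
--     for r in range(n - 1, -1, -1):
--         for c in range(m - 1, -1, -1):
--             if matrix[r][c] != 0:
--                 dp[r][c] = 1 + min(dp[r + 1][c], dp[r][c + 1], dp[r + 1][c + 1])
--     for row in range(rows):
--         for col in range(cols):
--             if matrix[row][col] == 1 and dp[row][col] >= size:
--                 for i in range(size):
--                     for j in range(size):
--                         matrix[row + i][col + j] = 2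
--                 return matrix
--     return None
-- ===== Notes on version B (the rewrite author's own statement) =====
-- stated objective: faster
-- what changed: A rescans a size x size block per cell via is_valid (plus a no-op backtrack search); B builds one suffix dp table dp[r][c] = side of the largest all-nonzero square with top-left (r,c) bottom-up, then does a single row-major scan comparing dp[r][c] against min(rows,cols).
-- outside the precondition, e.g. on solve([[0, 0], [0]], 1, 1): A returns None, B raises IndexError
import Mathlib
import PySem

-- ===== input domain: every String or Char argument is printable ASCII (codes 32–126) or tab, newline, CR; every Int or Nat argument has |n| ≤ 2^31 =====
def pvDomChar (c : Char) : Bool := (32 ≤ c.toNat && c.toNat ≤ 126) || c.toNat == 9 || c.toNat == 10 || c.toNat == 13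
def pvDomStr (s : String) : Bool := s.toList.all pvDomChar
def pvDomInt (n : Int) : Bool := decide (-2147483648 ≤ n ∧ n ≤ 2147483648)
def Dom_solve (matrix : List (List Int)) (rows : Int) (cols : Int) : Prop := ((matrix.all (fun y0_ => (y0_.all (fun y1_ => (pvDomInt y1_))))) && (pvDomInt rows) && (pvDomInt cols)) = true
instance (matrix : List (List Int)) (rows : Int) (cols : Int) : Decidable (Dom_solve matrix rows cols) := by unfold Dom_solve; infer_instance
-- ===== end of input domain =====

-- B replaces A's per-cell is_valid rescans (and the no-op backtrack search) with one suffix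
-- dp table built in a single pass, then a single row-major scan; objective: faster.
-- A mutates `matrix` in place when it finds a square; the equivalence proved here is about
-- the RETURN value only (the Python B performs the same in-place mutation).

-- ===== PORT A =====

-- matrix[r][c] via PySem indexing with defaults; exact wherever Python's indexing succeeds
-- (Pre_solve excludes the inputs on which Python would raise IndexError).
def pyCell (matrix : List (List Int)) (r c : Int) : Int :=
  PySem.List.pyGetD (PySem.List.pyGetD matrix r []) c 0

def is_valid (matrix : List (List Int)) (row col size : Int) : Bool :=
  (PySem.List.pyRange 0 size 1).all fun i =>
    (PySem.List.pyRange 0 size 1).all fun j =>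
      !(decide ((matrix.length : Int) ≤ row + i) ||
        decide (((PySem.List.pyGetD matrix 0 []).length : Int) ≤ col + j) ||
        (pyCell matrix (row + i) (col + j) == 0))

theorem is_valid_of_nonpos (matrix : List (List Int)) (row col size : Int)
    (h : size ≤ 0) : is_valid matrix row col size = true := by
  unfold is_valid
  rw [PySem.List.pyRange_one_eq_nil (by omega)]
  rfl

def backtrack (matrix : List (List Int)) (row col size : Int) : Int :=
  if is_valid matrix row col size then size
  else backtrack matrix row col (size - 1)
termination_by size.toNat
decreasing_by
  rename_i h
  have : ¬ size ≤ 0 := fun hle => h (is_valid_of_nonpos matrix row col size hle)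
  omega

def find_largest_square (matrix : List (List Int)) (rows cols : Int) : Int :=
  (PySem.List.pyRange 0 rows 1).foldl (fun ms row =>
    (PySem.List.pyRange 0 cols 1).foldl (fun ms col =>
      if pyCell matrix row col == 1 then max ms (backtrack matrix row col ms) else ms) ms)
    (min rows cols)

def update_matrix (matrix : List (List Int)) (row col size : Int) : List (List Int) :=
  (PySem.List.pyRange 0 size 1).foldl (fun m i =>
    (PySem.List.pyRange 0 size 1).foldl (fun m j =>
      PySem.List.pySetD m (row + i)
        (PySem.List.pySetD (PySem.List.pyGetD m (row + i) []) (col + j) 2)) m) matrix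

def solve (matrix : List (List Int)) (rows : Int) (cols : Int) : Option (List (List Int)) :=
  let largest := find_largest_square matrix rows cols
  (PySem.List.pyRange 0 rows 1).findSome? fun row =>
    (PySem.List.pyRange 0 cols 1).findSome? fun col =>
      if pyCell matrix row col == 1 && is_valid matrix row col largest
      then some (update_matrix matrix row col largest) else none

-- ===== PORT B =====

-- dp row r built right-to-left from matrix row r and dp row r+1 (`below`); trailing sentinel 0.
def dpRowB (mrow below : List Int) : List Int :=
  match mrow with
  | [] => [0]
  | v :: vs =>
    let rest := dpRowB vs below.tail
    (if v ≠ 0 then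
        1 + min (below.headD 0) (min (rest.headD 0) (below.tail.headD 0))
      else 0) :: rest

-- the (n+1)×(m+1) suffix dp table, built bottom-up
def dpTableB (matrix : List (List Int)) (m : Nat) : List (List Int) :=
  match matrix with
  | [] => [List.replicate (m + 1) 0]
  | r :: rs =>
    let rest := dpTableB rs m
    dpRowB r (rest.headD []) :: rest

def markB (matrix : List (List Int)) (row col size : Int) : List (List Int) :=
  (PySem.List.pyRange 0 size 1).foldl (fun m i =>
    (PySem.List.pyRange 0 size 1).foldl (fun m j =>
      PySem.List.pySetD m (row + i)
        (PySem.List.pySetD (PySem.List.pyGetD m (row + i) []) (col + j) 2)) m) matrix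

def solve_alt (matrix : List (List Int)) (rows : Int) (cols : Int) : Option (List (List Int)) :=
  if rows ≤ 0 ∨ cols ≤ 0 then none
  else
    let m := (matrix.headD []).length
    let size := min rows cols
    let dp := dpTableB matrix m
    (PySem.List.pyRange 0 rows 1).findSome? fun row =>
      (PySem.List.pyRange 0 cols 1).findSome? fun col =>
        if pyCell matrix row col == 1 &&
            decide (size ≤ PySem.List.pyGetD (PySem.List.pyGetD dp row []) col 0)
        then some (markB matrix row col size) else none

-- ===== PRECONDITION & SPEC =====
-- Pre_ excludes the inputs on which A raises IndexError (rows/cols exceeding the matrix'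
-- dimensions with both positive) and, among them, ragged matrices (rows of unequal length):
-- on a ragged matrix A sometimes returns (when its scans never reach a short row) but B's
-- dp pass reads every cell and raises.
def Pre_solve (matrix : List (List Int)) (rows : Int) (cols : Int) : Prop :=
  rows ≤ 0 ∨ cols ≤ 0 ∨
    (rows ≤ (matrix.length : Int) ∧ cols ≤ ((matrix.headD []).length : Int) ∧
      ∀ r ∈ matrix, r.length = (matrix.headD []).length)
instance (matrix : List (List Int)) (rows : Int) (cols : Int) : Decidable (Pre_solve matrix rows cols) := by unfold Pre_solve; infer_instance

def pvWitness_solve : List (List Int) × Int × Int := ([[1, 0], [1, 1]], 2, 2)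

def Spec_solve (matrix : List (List Int)) (rows : Int) (cols : Int) (out : Option (List (List Int))) : Prop := out = solve_alt matrix rows cols
instance (matrix : List (List Int)) (rows : Int) (cols : Int) (out : Option (List (List Int))) : Decidable (Spec_solve matrix rows cols out) := by unfold Spec_solve; infer_instance

-- ===== CLAIM (what is proved, stated in full; the proofs are below) =====
def Claim_equal_solve : Prop := ∀ (matrix : List (List Int)) (rows : Int) (cols : Int), Dom_solve matrix rows cols → Pre_solve matrix rows cols → Spec_solve matrix rows cols (solve matrix rows cols)

-- ===== LEMMAS AND PROOFS =====

theorem backtrack_le (matrix : List (List Int)) (row col size : Int) :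
    backtrack matrix row col size ≤ size := by
  fun_induction backtrack matrix row col size with
  | case1 => omega
  | case2 h ih => omega

theorem foldl_fixed {α β : Type} (f : α → β → α) (l : List β)
    (a : α) (h : ∀ b ∈ l, ∀ x, f x b = x) : l.foldl f a = a := by
  induction l generalizing a with
  | nil => rfl
  | cons b bs ih =>
    simp only [List.foldl_cons, h b (by simp)]
    exact ih a (fun c hc x => h c (by simp [hc]) x)

theorem find_largest_eq (matrix : List (List Int)) (rows cols : Int) :
    find_largest_square matrix rows cols = min rows cols := by
  unfold find_largest_square
  apply foldl_fixed
  intro b _ x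
  apply foldl_fixed
  intro c _ y
  split
  · have := backtrack_le matrix b c y
    omega
  · rfl

-- the cell predicate ("blocked means == 0") in Nat coordinates
def goodCell (matrix : List (List Int)) (r c : Nat) : Bool :=
  (matrix.getD r []).getD c 0 != 0

-- the size-s all-nonzero square at (r,c) fits (n, m: full matrix dimensions)
def ValidSq (matrix : List (List Int)) (n m r c s : Nat) : Prop :=
  ∀ i < s, ∀ j < s, r + i < n ∧ c + j < m ∧ goodCell matrix (r + i) (c + j) = true

-- the mathematical suffix dp
def fdp (matrix : List (List Int)) (n m r c : Nat) : Nat :=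
  if r < n ∧ c < m then
    if goodCell matrix r c then
      1 + min (fdp matrix n m (r + 1) c) (min (fdp matrix n m r (c + 1)) (fdp matrix n m (r + 1) (c + 1)))
    else 0
  else 0
termination_by (n - r) + (m - c)
decreasing_by all_goals omega

theorem fdp_pos_eq (matrix : List (List Int)) (n m r c : Nat)
    (hb : r < n ∧ c < m) (hg : goodCell matrix r c = true) :
    fdp matrix n m r c = 1 + min (fdp matrix n m (r + 1) c)
      (min (fdp matrix n m r (c + 1)) (fdp matrix n m (r + 1) (c + 1))) := by
  rw [fdp, if_pos hb, if_pos hg]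

theorem fdp_bad_eq (matrix : List (List Int)) (n m r c : Nat)
    (hb : r < n ∧ c < m) (hg : goodCell matrix r c = false) :
    fdp matrix n m r c = 0 := by
  rw [fdp, if_pos hb, if_neg (by simp [hg])]

theorem fdp_ge_iff (matrix : List (List Int)) (n m : Nat) :
    ∀ s r c, (s ≤ fdp matrix n m r c ↔ ValidSq matrix n m r c s) := by
  intro s
  induction s with
  | zero =>
    intro r c
    constructor
    · intro _ i hi
      omega
    · intro _
      exact Nat.zero_le _
  | succ s ih =>
    intro r c
    rw [fdp]
    by_cases hb : r < n ∧ c < m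
    · by_cases hg : goodCell matrix r c = true
      · rw [if_pos hb, if_pos hg]
        constructor
        · intro h i hi j hj
          have v1 := (ih (r+1) c).mp (by omega)
          have v2 := (ih r (c+1)).mp (by omega)
          have v3 := (ih (r+1) (c+1)).mp (by omega)
          by_cases hi0 : i = 0
          · by_cases hj0 : j = 0
            · subst hi0; subst hj0
              simpa using ⟨hb.1, hb.2, hg⟩
            · obtain ⟨a1, a2, a3⟩ := v2 0 (by omega) (j-1) (by omega)
              subst hi0
              refine ⟨by omega, by omega, ?_⟩
              have e : c + 1 + (j-1) = c + j := by omega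
              rw [e] at a3
              simpa using a3
          · by_cases hj0 : j = 0
            · obtain ⟨a1, a2, a3⟩ := v1 (i-1) (by omega) 0 (by omega)
              subst hj0
              refine ⟨by omega, by omega, ?_⟩
              have e : r + 1 + (i-1) = r + i := by omega
              rw [e] at a3
              simpa using a3
            · obtain ⟨a1, a2, a3⟩ := v3 (i-1) (by omega) (j-1) (by omega)
              refine ⟨by omega, by omega, ?_⟩
              have e1 : r + 1 + (i-1) = r + i := by omega
              have e2 : c + 1 + (j-1) = c + j := by omega
              rw [e1, e2] at a3
              exact a3
        · intro hv
          have g1 : ValidSq matrix n m (r+1) c s := by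
            intro i hi j hj
            obtain ⟨a1, a2, a3⟩ := hv (i+1) (by omega) j (by omega)
            have e : r + (i+1) = r + 1 + i := by omega
            rw [e] at a1 a3
            exact ⟨a1, a2, a3⟩
          have g2 : ValidSq matrix n m r (c+1) s := by
            intro i hi j hj
            obtain ⟨a1, a2, a3⟩ := hv i (by omega) (j+1) (by omega)
            have e : c + (j+1) = c + 1 + j := by omega
            rw [e] at a2 a3
            exact ⟨a1, a2, a3⟩
          have g3 : ValidSq matrix n m (r+1) (c+1) s := by
            intro i hi j hj
            obtain ⟨a1, a2, a3⟩ := hv (i+1) (by omega) (j+1) (by omega)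
            have e1 : r + (i+1) = r + 1 + i := by omega
            have e2 : c + (j+1) = c + 1 + j := by omega
            rw [e1] at a1
            rw [e2] at a2
            rw [e1, e2] at a3
            exact ⟨a1, a2, a3⟩
          have h1 := (ih (r+1) c).mpr g1
          have h2 := (ih r (c+1)).mpr g2
          have h3 := (ih (r+1) (c+1)).mpr g3
          omega
      · rw [if_pos hb, if_neg hg]
        constructor
        · intro h
          exact absurd h (by omega)
        · intro hv
          exact absurd (hv 0 (by omega) 0 (by omega)).2.2 (by simpa using hg)
    · rw [if_neg hb]
      constructor
      · intro h
        exact absurd h (by omega)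
      · intro hv
        obtain ⟨a1, a2, _⟩ := hv 0 (by omega) 0 (by omega)
        exact absurd (⟨by omega, by omega⟩ : r < n ∧ c < m) hb

theorem pyGetD_nonneg_toNat {α : Type} (xs : List α) (i : Int) (d : α) (h : 0 ≤ i) :
    PySem.List.pyGetD xs i d = xs.getD i.toNat d := by
  simp [PySem.List.pyGetD, PySem.List.pyGet?_of_nonneg xs h, List.getD_eq_getElem?_getD]

theorem getD_eq_headD_drop {α : Type} (l : List α) (k : Nat) (d : α) :
    l.getD k d = (l.drop k).headD d := by
  induction k generalizing l with
  | zero => cases l <;> rfl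
  | succ k ih =>
    cases l with
    | nil => rfl
    | cons x xs => simpa using ih xs

theorem findSome?_congr {α β : Type} (l : List α) (f g : α → Option β)
    (h : ∀ x ∈ l, f x = g x) : l.findSome? f = l.findSome? g := by
  induction l with
  | nil => rfl
  | cons x xs ih =>
    simp only [List.findSome?_cons, h x (by simp)]
    cases g x with
    | none => exact ih (fun y hy => h y (by simp [hy]))
    | some b => rfl

theorem findSome?_const_none {α β : Type} (l : List α) :
    l.findSome? (fun _ => (none : Option β)) = none := by
  induction l with
  | nil => rfl
  | cons x xs ih => simpa using ih

theorem length_dpRowB (vs : List Int) : ∀ below, (dpRowB vs below).length = vs.length + 1 := by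
  induction vs with
  | nil => intro below; rfl
  | cons v vs ih => intro below; simp [dpRowB, ih]

theorem dpRowB_drop (vs : List Int) : ∀ (below : List Int) (k : Nat), k ≤ vs.length →
    (dpRowB vs below).drop k = dpRowB (vs.drop k) (below.drop k) := by
  induction vs with
  | nil =>
    intro below k hk
    simp only [List.length_nil, Nat.le_zero] at hk
    subst hk
    rfl
  | cons v vs ih =>
    intro below k hk
    cases k with
    | zero => rfl
    | succ k =>
      have h1 : (dpRowB (v :: vs) below).drop (k+1) = (dpRowB vs below.tail).drop k := by
        simp [dpRowB]
      rw [h1, ih below.tail k (by simpa using hk)]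
      have h2 : below.tail.drop k = below.drop (k+1) := by
        cases below <;> simp
      rw [h2]
      rfl

theorem dpRowB_getD (matrix : List (List Int)) (n m r : Nat) (hr : r < n)
    (vs below : List Int) (hvs : vs = matrix.getD r []) (hlen : vs.length = m)
    (hbelow : ∀ c : Nat, below.getD c 0 = (fdp matrix n m (r+1) c : Int)) :
    ∀ c : Nat, (dpRowB vs below).getD c 0 = (fdp matrix n m r c : Int) := by
  have hout : ∀ c : Nat, m ≤ c → (dpRowB vs below).getD c 0 = (fdp matrix n m r c : Int) := by
    intro c hc
    have hfd : fdp matrix n m r c = 0 := by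
      rw [fdp, if_neg (by omega)]
    rw [hfd]
    by_cases hcm : c = m
    · subst hcm
      rw [getD_eq_headD_drop, dpRowB_drop vs below c (by omega)]
      have hnil : vs.drop c = [] := List.drop_eq_nil_of_le (by omega)
      rw [hnil]
      rfl
    · rw [List.getD_eq_default]
      · rfl
      · rw [length_dpRowB]
        omega
  have key : ∀ (d c : Nat), m - c ≤ d → (dpRowB vs below).getD c 0 = (fdp matrix n m r c : Int) := by
    intro d
    induction d with
    | zero =>
      intro c hc
      exact hout c (by omega)
    | succ d ih =>
      intro c hc
      by_cases hcm : c < m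
      · rw [getD_eq_headD_drop, dpRowB_drop vs below c (by omega)]
        have hdc : vs.drop c = vs.getD c 0 :: vs.drop (c+1) := by
          rw [List.drop_eq_getElem_cons (by omega), List.getD_eq_getElem _ _ (by omega)]
        rw [hdc]
        simp only [dpRowB, List.headD_cons]
        have e2 : (dpRowB (vs.drop (c+1)) (below.drop (c+1))).headD 0 = (fdp matrix n m r (c+1) : Int) := by
          rw [← dpRowB_drop vs below (c+1) (by omega), ← getD_eq_headD_drop]
          exact ih (c+1) (by omega)
        rw [List.tail_drop, e2,
          ← getD_eq_headD_drop below c 0, ← getD_eq_headD_drop below (c+1) 0,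
          hbelow c, hbelow (c+1)]
        have hgood : goodCell matrix r c = (vs.getD c 0 != 0) := by
          unfold goodCell
          rw [hvs]
        by_cases hz : vs.getD c 0 = 0
        · have hgz : goodCell matrix r c = false := by
            rw [hgood, hz]
            rfl
          rw [if_neg (not_not_intro hz), fdp_bad_eq matrix n m r c ⟨hr, hcm⟩ hgz]
          rfl
        · have hgz : goodCell matrix r c = true := by
            rw [hgood]
            simpa using hz
          rw [if_pos hz, fdp_pos_eq matrix n m r c ⟨hr, hcm⟩ hgz]
          push_cast
          omega
      · exact hout c (by omega)
  intro c
  exact key (m - c) c le_rfl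

theorem length_dpTableB (matrix : List (List Int)) (m : Nat) :
    (dpTableB matrix m).length = matrix.length + 1 := by
  induction matrix with
  | nil => rfl
  | cons r rs ih => simp [dpTableB, ih]

theorem dpTableB_drop (matrix : List (List Int)) (m : Nat) : ∀ k, k ≤ matrix.length →
    (dpTableB matrix m).drop k = dpTableB (matrix.drop k) m := by
  induction matrix with
  | nil =>
    intro k hk
    simp only [List.length_nil, Nat.le_zero] at hk
    subst hk
    rfl
  | cons r rs ih =>
    intro k hk
    cases k with
    | zero => rfl
    | succ k =>
      have h1 : (dpTableB (r :: rs) m).drop (k+1) = (dpTableB rs m).drop k := by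
        simp [dpTableB]
      rw [h1, ih k (by simpa using hk)]
      rfl

theorem dpTableB_out (matrix : List (List Int)) (m : Nat) (r : Nat)
    (hr : matrix.length ≤ r) :
    ∀ c : Nat, ((dpTableB (matrix.drop r) m).headD []).getD c 0
      = (fdp matrix matrix.length m r c : Int) := by
  intro c
  have hnil : matrix.drop r = [] := List.drop_eq_nil_of_le hr
  rw [hnil]
  have hf : fdp matrix matrix.length m r c = 0 := by
    rw [fdp, if_neg (by omega)]
  rw [hf]
  show (List.replicate (m+1) (0:Int)).getD c 0 = ((0:Nat) : Int)
  by_cases hcm : c < m + 1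
  · rw [List.getD_eq_getElem _ _ (by simpa using hcm)]
    simp
  · rw [List.getD_eq_default]
    · rfl
    · simpa using hcm

theorem dpTableB_head_spec (matrix : List (List Int)) (m : Nat)
    (hrect : ∀ row ∈ matrix, row.length = m) :
    ∀ (d r : Nat), matrix.length - r ≤ d → ∀ c : Nat,
      ((dpTableB (matrix.drop r) m).headD []).getD c 0
        = (fdp matrix matrix.length m r c : Int) := by
  intro d
  induction d with
  | zero =>
    intro r hr c
    exact dpTableB_out matrix m r (by omega) c
  | succ d ih =>
    intro r hr c
    by_cases hrn : r < matrix.length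
    · have hdc : matrix.drop r = matrix.getD r [] :: matrix.drop (r+1) := by
        rw [List.drop_eq_getElem_cons hrn, List.getD_eq_getElem _ _ hrn]
      rw [hdc]
      show (dpRowB (matrix.getD r []) ((dpTableB (matrix.drop (r+1)) m).headD [])).getD c 0 = _
      refine dpRowB_getD matrix matrix.length m r hrn _ _ rfl ?_ ?_ c
      · rw [List.getD_eq_getElem _ _ hrn]
        exact hrect _ (List.getElem_mem hrn)
      · intro c'
        exact ih (r+1) (by omega) c'
    · exact dpTableB_out matrix m r (by omega) c

theorem dpTable_spec (matrix : List (List Int)) (m : Nat)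
    (hrect : ∀ row ∈ matrix, row.length = m) :
    ∀ k c : Nat, ((dpTableB matrix m).getD k []).getD c 0
      = (fdp matrix matrix.length m k c : Int) := by
  intro k c
  by_cases hk : k ≤ matrix.length
  · rw [getD_eq_headD_drop (dpTableB matrix m) k [], dpTableB_drop matrix m k hk]
    exact dpTableB_head_spec matrix m hrect (matrix.length - k) k le_rfl c
  · have hnil : (dpTableB matrix m).getD k [] = [] :=
      List.getD_eq_default _ _ (by rw [length_dpTableB]; omega)
    have hf : fdp matrix matrix.length m k c = 0 := by
      rw [fdp, if_neg (by omega)]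
    rw [hnil, hf]
    rfl

theorem headD_eq_getD_zero (matrix : List (List Int)) :
    matrix.headD [] = matrix.getD 0 [] := by
  cases matrix <;> rfl

theorem is_valid_iff (matrix : List (List Int)) (row col size : Int)
    (hr : 0 ≤ row) (hc : 0 ≤ col) :
    (is_valid matrix row col size = true) ↔
      ValidSq matrix matrix.length (matrix.headD []).length row.toNat col.toNat size.toNat := by
  have hhead : PySem.List.pyGetD matrix 0 [] = matrix.headD [] := by
    rw [pyGetD_nonneg_toNat _ _ _ le_rfl, headD_eq_getD_zero]
    rfl
  have hcell : ∀ i j : Int, 0 ≤ i → 0 ≤ j →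
      pyCell matrix i j = (matrix.getD i.toNat []).getD j.toNat 0 := by
    intro i j hi hj
    unfold pyCell
    rw [pyGetD_nonneg_toNat _ _ _ hi, pyGetD_nonneg_toNat _ _ _ hj]
  unfold is_valid
  rw [List.all_eq_true]
  constructor
  · intro h i hi j hj
    have hmi : (i : Int) ∈ PySem.List.pyRange 0 size 1 :=
      (PySem.List.mem_pyRange_one).mpr ⟨by omega, by omega⟩
    have h2 := h _ hmi
    rw [List.all_eq_true] at h2
    have h3 := h2 _ ((PySem.List.mem_pyRange_one).mpr ⟨by omega, by omega⟩ :
      ((j:Int)) ∈ PySem.List.pyRange 0 size 1)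
    rw [hhead] at h3
    simp only [Bool.not_eq_eq_eq_not, Bool.not_true, Bool.or_eq_false_iff,
      decide_eq_false_iff_not, not_le, beq_eq_false_iff_ne] at h3
    obtain ⟨⟨hb1, hb2⟩, hb3⟩ := h3
    rw [hcell _ _ (by omega) (by omega)] at hb3
    have e1 : (row + (i:Int)).toNat = row.toNat + i := by omega
    have e2 : (col + (j:Int)).toNat = col.toNat + j := by omega
    rw [e1, e2] at hb3
    refine ⟨by omega, by omega, ?_⟩
    unfold goodCell
    simpa [bne_iff_ne] using hb3
  · intro h x hx
    rw [List.all_eq_true]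
    intro y hy
    rw [PySem.List.mem_pyRange_one] at hx hy
    obtain ⟨a1, a2, a3⟩ := h x.toNat (by omega) y.toNat (by omega)
    rw [hhead]
    simp only [Bool.not_eq_eq_eq_not, Bool.not_true, Bool.or_eq_false_iff,
      decide_eq_false_iff_not, not_le, beq_eq_false_iff_ne]
    have e1 : (row + x).toNat = row.toNat + x.toNat := by omega
    have e2 : (col + y).toNat = col.toNat + y.toNat := by omega
    refine ⟨⟨by omega, by omega⟩, ?_⟩
    rw [hcell _ _ (by omega) (by omega), e1, e2]
    unfold goodCell at a3
    simpa [bne_iff_ne] using a3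

theorem markB_eq_update (matrix : List (List Int)) (row col size : Int) :
    markB matrix row col size = update_matrix matrix row col size := rfl

-- ===== VERDICT (by name: the statement is the Claim_ definition above) =====
theorem solve_spec : Claim_equal_solve := by
  unfold Claim_equal_solve
  intro matrix rows cols _ hpre
  unfold Spec_solve solve solve_alt
  by_cases hrneg : rows ≤ 0
  · have h1 : PySem.List.pyRange 0 rows 1 = [] := PySem.List.pyRange_one_eq_nil hrneg
    rw [h1, if_pos (Or.inl hrneg)]
    rfl
  · by_cases hcneg : cols ≤ 0
    · have h1 : PySem.List.pyRange 0 cols 1 = [] := PySem.List.pyRange_one_eq_nil hcneg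
      rw [if_pos (Or.inr hcneg), h1]
      simp only [List.findSome?_nil]
      exact findSome?_const_none _
    · rcases hpre with h | h | ⟨hA, hB, hC⟩
      · exact absurd h hrneg
      · exact absurd h hcneg
      · rw [if_neg (by omega)]
        dsimp only
        rw [find_largest_eq]
        apply findSome?_congr
        intro row hrow
        apply findSome?_congr
        intro col hcol
        rw [PySem.List.mem_pyRange_one] at hrow hcol
        have hcond : is_valid matrix row col (min rows cols) =
            decide ((min rows cols) ≤ PySem.List.pyGetD
              (PySem.List.pyGetD (dpTableB matrix (matrix.headD []).length) row []) col 0) := by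
          rw [Bool.eq_iff_iff, decide_eq_true_iff]
          rw [is_valid_iff matrix row col (min rows cols) (by omega) (by omega)]
          have hdp : PySem.List.pyGetD
              (PySem.List.pyGetD (dpTableB matrix (matrix.headD []).length) row []) col 0
              = (fdp matrix matrix.length (matrix.headD []).length row.toNat col.toNat : Int) := by
            rw [pyGetD_nonneg_toNat _ row _ (by omega), pyGetD_nonneg_toNat _ col _ (by omega)]
            exact dpTable_spec matrix _ hC row.toNat col.toNat
          rw [hdp,
            ← fdp_ge_iff matrix matrix.length (matrix.headD []).length
              (min rows cols).toNat row.toNat col.toNat]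
          omega
        rw [hcond, markB_eq_update]
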